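-- pv_equiv track=rewrite | github.com/ivanovmi/Requirements-Parser | reporter/report.py | get_word_length
-- ===== SOURCE A (Python) =====
-- def get_word_length(dictionary):
--     # Default length of table columns -> 'Package name', 'MOS', 'Upstream'
--     length = [12, 3, 8]
--     for key in dictionary.keys():
--         if len(key) > length[0]:
--             length[0] = len(key)
--         if len(dictionary[key][0]) > length[1]:
--             length[1] = len(dictionary[key][0])
--         if len(dictionary[key][1]) > length[2]:
--             length[2] = len(dictionary[key][1])
--     return length
-- ===== SOURCE B (Python) =====
-- def _colmax(rows):
--     # divide and conquer: elementwise max of a nonempty list of rows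
--     if len(rows) == 1:
--         return rows[0]
--     mid = len(rows) // 2
--     return [max(a, b) for a, b in zip(_colmax(rows[:mid]), _colmax(rows[mid:]))]
--
--
-- def get_word_length(dictionary):
--     # Build one width-row per entry, prepend the seed row, then merge
--     # them by divide-and-conquer elementwise max.
--     rows = [[12, 3, 8]] + [[len(k), len(v[0]), len(v[1])]
--                            for k, v in dictionary.items()]
--     return _colmax(rows)
-- ===== Notes on version B (the rewrite author's own statement) =====
-- stated objective: alternative
-- what changed: Instead of one linear pass maintaining three running maxima with conditional updates, B builds a width-row [len(key), len(v[0]), len(v[1])] per entry plus the seed row [12,3,8] and merges the rows by recursive divide-and-conquer elementwise max; Pre_ excludes value lists with fewer than two entries (A raises IndexError there) and association lists with duplicate keys (not representable by a Python dict).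
import Mathlib
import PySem

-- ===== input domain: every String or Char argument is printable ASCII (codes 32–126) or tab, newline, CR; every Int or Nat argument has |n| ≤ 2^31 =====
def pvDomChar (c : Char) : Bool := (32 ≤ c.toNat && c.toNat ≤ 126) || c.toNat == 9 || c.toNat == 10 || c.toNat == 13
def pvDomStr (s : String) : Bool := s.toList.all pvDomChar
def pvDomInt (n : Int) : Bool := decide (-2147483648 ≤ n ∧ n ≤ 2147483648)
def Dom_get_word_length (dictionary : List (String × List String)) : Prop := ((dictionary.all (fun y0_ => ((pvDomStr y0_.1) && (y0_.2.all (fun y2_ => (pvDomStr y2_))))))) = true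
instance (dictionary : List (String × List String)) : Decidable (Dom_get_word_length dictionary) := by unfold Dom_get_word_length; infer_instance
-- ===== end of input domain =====

-- B replaces A's single pass with three conditional running maxima by a divide-and-conquer
-- elementwise-max merge of per-entry width rows: same values, a different algorithm.

-- ===== PORT A =====
-- single pass over the dict's keys, three conditional running-maximum updates; v[0]/v[1]
-- ported as pyGet? with a "" default, exact under Pre_ (which demands 2 ≤ length of each value)
def stepA (length : List Int) (key : String) (v : List String) : List Int :=
  let l0 : Int := if PySem.Str.len key > length.getD 0 0 then PySem.Str.len key else length.getD 0 0
  let l1 : Int := if PySem.Str.len ((PySem.List.pyGet? v 0).getD "") > length.getD 1 0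
                  then PySem.Str.len ((PySem.List.pyGet? v 0).getD "") else length.getD 1 0
  let l2 : Int := if PySem.Str.len ((PySem.List.pyGet? v 1).getD "") > length.getD 2 0
                  then PySem.Str.len ((PySem.List.pyGet? v 1).getD "") else length.getD 2 0
  [l0, l1, l2]

def get_word_length (dictionary : List (String × List String)) : List Int :=
  ((PySem.Dict.mk dictionary).keys).foldl (fun (length : List Int) key =>
    stepA length key (((PySem.Dict.mk dictionary).get? key).getD [])) [12, 3, 8]

-- ===== PORT B =====
-- Python _colmax: recursive divide-and-conquer elementwise max of a nonempty row list.
-- The guard is `length ≤ 1` (Python tests `== 1`) only to make the recursion total; the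
-- extra case is never reached from get_word_length_alt, which always prepends the seed row.
def colmax (rows : List (List Int)) : List Int :=
  if rows.length ≤ 1 then rows.headD []
  else
    (colmax (rows.take (rows.length / 2))).zipWith max (colmax (rows.drop (rows.length / 2)))
termination_by rows.length
decreasing_by
  · simp only [List.length_take]; omega
  · simp only [List.length_drop]; omega

-- the width row of one dictionary entry: [len(k), len(v[0]), len(v[1])]
def rowOf (p : String × List String) : List Int :=
  [PySem.Str.len p.1,
   PySem.Str.len ((PySem.List.pyGet? p.2 0).getD ""),
   PySem.Str.len ((PySem.List.pyGet? p.2 1).getD "")]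

def get_word_length_alt (dictionary : List (String × List String)) : List Int :=
  colmax ([12, 3, 8] :: dictionary.map rowOf)

-- ===== PRECONDITION & SPEC =====
-- Pre_ excludes (a) value lists with fewer than two entries, on which A (and B) raise IndexError,
-- and (b) association lists with duplicate keys, which do not represent any Python dict.
def Pre_get_word_length (dictionary : List (String × List String)) : Prop :=
  (dictionary.map (·.1)).Nodup ∧ ∀ p ∈ dictionary, 2 ≤ p.2.length
instance (dictionary : List (String × List String)) : Decidable (Pre_get_word_length dictionary) := by
  unfold Pre_get_word_length; infer_instance

def pvWitness_get_word_length : (List (String × List String)) :=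
  [("numpy", ["1.2", "1.3"]), ("requests", ["2.0", "2.1.0"])]

def Spec_get_word_length (dictionary : List (String × List String)) (out : List Int) : Prop := out = get_word_length_alt dictionary
instance (dictionary : List (String × List String)) (out : List Int) : Decidable (Spec_get_word_length dictionary out) := by unfold Spec_get_word_length; infer_instance

-- ===== CLAIM (what is proved, stated in full; the proofs are below) =====
def Claim_equal_get_word_length : Prop := ∀ (dictionary : List (String × List String)), Dom_get_word_length dictionary → Pre_get_word_length dictionary → Spec_get_word_length dictionary (get_word_length dictionary)

-- ===== LEMMAS AND PROOFS =====

-- with no duplicate keys, looking a pair's own key up in the dict yields its value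
theorem pv_get?_self_of_nodup (d : List (String × List String)) :
    (d.map (·.1)).Nodup → ∀ p ∈ d, (PySem.Dict.mk d).get? p.1 = some p.2 := by
  induction d with
  | nil => intro _ p hp; cases hp
  | cons q rest ih =>
    intro hnd p hp
    simp only [List.map_cons, List.nodup_cons] at hnd
    rw [PySem.Dict.get?_mk_cons]
    rcases List.mem_cons.mp hp with hp | hp
    · subst hp; simp
    · have hne : q.1 ≠ p.1 := fun h => hnd.1 (h ▸ List.mem_map_of_mem hp)
      simp only [beq_iff_eq, if_neg hne]
      exact ih hnd.2 p hp

-- elementwise max of two rows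
def emax (x y : List Int) : List Int := x.zipWith max y

theorem emax_assoc (x y z : List Int) : emax (emax x y) z = emax x (emax y z) := by
  induction x generalizing y z with
  | nil => simp [emax]
  | cons a x ih =>
    cases y with
    | nil => simp [emax]
    | cons b y =>
      cases z with
      | nil => simp [emax]
      | cons c z => simp [emax, List.zipWith, max_assoc]; exact ih y z

theorem foldl_emax_assoc (l : List (List Int)) (a y : List Int) :
    l.foldl emax (emax a y) = emax a (l.foldl emax y) := by
  induction l generalizing y with
  | nil => simp
  | cons z l ih => rw [List.foldl_cons, List.foldl_cons, emax_assoc, ih]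

-- divide-and-conquer elementwise max = left fold of elementwise max over the tail
theorem colmax_eq_foldl : ∀ n (rows : List (List Int)), rows.length = n →
    ∀ x l, rows = x :: l → colmax rows = l.foldl emax x := by
  intro n
  induction n using Nat.strong_induction_on with
  | _ n ih =>
    intro rows hn x l hxl
    subst hxl
    rw [colmax]
    by_cases h1 : (x :: l).length ≤ 1
    · have hl : l = [] := by
        cases l with
        | nil => rfl
        | cons a t => exfalso; simp only [List.length_cons] at h1; omega
      subst hl; simp
    · rw [if_neg h1]
      have h2 : 2 ≤ (x :: l).length := by omega
      obtain ⟨k, hk⟩ : ∃ k, (x :: l).length / 2 = k + 1 :=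
        ⟨(x :: l).length / 2 - 1, by omega⟩
      have hklt : k + 1 < (x :: l).length := by omega
      have hkl : k < l.length := by simp only [List.length_cons] at hklt; omega
      rw [hk]
      have htake : (x :: l).take (k + 1) = x :: l.take k := by simp
      have hdrop : (x :: l).drop (k + 1) = l.drop k := by simp
      obtain ⟨y, r, hyr⟩ := List.exists_cons_of_ne_nil
        (show l.drop k ≠ [] from List.ne_nil_of_length_pos (by simp only [List.length_drop]; omega))
      have hL := ih (k + 1) (by omega) ((x :: l).take (k + 1))
        (by simp only [List.length_take, List.length_cons]; omega) x (l.take k) htake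
      have hR := ih ((x :: l).length - (k + 1)) (by omega) ((x :: l).drop (k + 1))
        (by simp only [List.length_drop]) y r (hdrop.trans hyr)
      rw [hL, hR]
      have hsplit : l = l.take k ++ (y :: r) := by
        rw [← hyr, ← List.take_append_drop k l]
        simp
      conv_rhs => rw [hsplit]
      rw [List.foldl_append, List.foldl_cons, foldl_emax_assoc]
      rfl

-- running conditional max = elementwise max
theorem pv_ite_max (a x : Int) : (if x > a then x else a) = max a x := by
  rw [max_def]; split_ifs <;> omega

theorem stepA_eq_emax (a b c : Int) (key : String) (v : List String) :
    stepA [a, b, c] key v = emax [a, b, c] (rowOf (key, v)) := by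
  simp [stepA, rowOf, emax, List.zipWith, pv_ite_max]

-- A's single pass from any triple = fold of elementwise max over the width rows
theorem pv_pass_eq (d : List (String × List String)) (a b c : Int) :
    d.foldl (fun (length : List Int) p => stepA length p.1 p.2) [a, b, c]
    = (d.map rowOf).foldl emax [a, b, c] := by
  induction d generalizing a b c with
  | nil => simp
  | cons p rest ih =>
    rw [List.foldl_cons, List.map_cons, List.foldl_cons, stepA_eq_emax]
    have hx : emax [a, b, c] (rowOf p)
        = [max a (PySem.Str.len p.1),
           max b (PySem.Str.len ((PySem.List.pyGet? p.2 0).getD "")),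
           max c (PySem.Str.len ((PySem.List.pyGet? p.2 1).getD ""))] := rfl
    rw [hx]; exact ih _ _ _

-- ===== VERDICT (by name: the statement is the Claim_ definition above) =====
theorem get_word_length_spec : Claim_equal_get_word_length := by
  intro d _ hpre
  unfold Spec_get_word_length get_word_length get_word_length_alt
  have hkeys : (PySem.Dict.mk d).keys = d.map (·.1) := by simp [PySem.Dict.keys]
  rw [hkeys, List.foldl_map]
  rw [PySem.List.foldl_congr_mem d _ (fun (length : List Int) p => stepA length p.1 p.2) [12, 3, 8]
        (by intro length p hp; rw [pv_get?_self_of_nodup d hpre.1 p hp, Option.getD_some])]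
  rw [pv_pass_eq]
  exact (colmax_eq_foldl ([12, 3, 8] :: d.map rowOf).length _ rfl [12, 3, 8] (d.map rowOf) rfl).symm
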